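-- pv_equiv track=rewrite | github.com/7Solomon/HomeServer | app/blueprints/storage/applications.py | process_release_assets
-- ===== SOURCE A (Python) =====
-- def process_release_assets(release_data):
--     """Process release assets and categorize by platform"""
--     if not release_data or 'assets' not in release_data:
--         return {}
--
--     assets = release_data['assets']
--     processed_assets = {
--         'windows': None,
--         'linux': None,
--         'android': None
--     }
--
--     for asset in assets:
--         name = asset['name'].lower()
--
--         # Windows detection
--         if ('windows' in name or name.endswith('.exe') or name.endswith('.msi')):
--             processed_assets['windows'] = asset
--
--         # Linux detection
--         elif ('linux' in name or name.endswith('.appimage') or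
--               name.endswith('.deb') or name.endswith('.rpm')):
--             processed_assets['linux'] = asset
--
--         # Android detection
--         elif ('android' in name or name.endswith('.apk')):
--             processed_assets['android'] = asset
--
--     return processed_assets
-- ===== SOURCE B (Python) =====
-- def process_release_assets(release_data):
--     """Process release assets and categorize by platform"""
--     if not release_data or 'assets' not in release_data:
--         return {}
--     assets = release_data['assets']
--     rules = [('windows', 'windows', ('.exe', '.msi')),
--              ('linux', 'linux', ('.appimage', '.deb', '.rpm')),
--              ('android', 'android', ('.apk',))]
--
--     def classify(name):
--         for platform, keyword, suffixes in rules: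
--             if keyword in name or name.endswith(suffixes):
--                 return platform
--         return None
--
--     return {platform: next((a for a in reversed(assets)
--                             if classify(a['name'].lower()) == platform), None)
--             for platform, _, _ in rules}
-- ===== Notes on version B (the rewrite author's own statement) =====
-- stated objective: idiomatic
-- what changed: B replaces A's single forward pass that mutates a three-key dict via an if/elif chain with a declarative rule table plus a first-match classifier, building the result by one reverse scan per platform (last matching asset wins).
-- outside the precondition, e.g. on process_release_assets({'assets': [{'url': 'x'}]}): A raises KeyError, B raises KeyError
import Mathlib
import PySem

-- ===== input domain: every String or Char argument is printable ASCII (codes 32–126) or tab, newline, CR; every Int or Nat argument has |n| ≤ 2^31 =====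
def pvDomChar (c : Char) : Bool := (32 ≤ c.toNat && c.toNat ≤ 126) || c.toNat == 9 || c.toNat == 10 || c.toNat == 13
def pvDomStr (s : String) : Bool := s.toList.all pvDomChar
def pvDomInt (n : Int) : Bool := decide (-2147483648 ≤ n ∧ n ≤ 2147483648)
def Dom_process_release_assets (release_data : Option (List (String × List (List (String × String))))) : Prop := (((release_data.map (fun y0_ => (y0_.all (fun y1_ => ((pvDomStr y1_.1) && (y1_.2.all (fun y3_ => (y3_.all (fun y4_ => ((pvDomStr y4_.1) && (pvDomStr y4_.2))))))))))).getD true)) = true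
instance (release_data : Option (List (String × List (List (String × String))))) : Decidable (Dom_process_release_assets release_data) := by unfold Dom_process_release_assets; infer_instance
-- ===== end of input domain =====

-- B replaces A's single forward pass that mutates a dict through an if/elif chain by a rule
-- table with a first-match classifier and one reverse scan per platform (last matching asset);
-- objective: idiomatic/alternative, same asymptotic cost.

-- ===== PORT A =====
-- asset['name'] (KeyError excluded by Pre_): under Pre_ the key is present, so getD "" is exact
def pvNameA (asset : List (String × String)) : String :=
  ((PySem.Dict.mk asset).get? "name").getD ""

def pvStepA (st : PySem.Dict String (Option (List (String × String))))
    (asset : List (String × String)) : PySem.Dict String (Option (List (String × String))) :=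
  let name := PySem.Str.lower (pvNameA asset)
  if PySem.Str.isIn "windows" name || PySem.Str.endswith name ".exe" || PySem.Str.endswith name ".msi" then
    st.insert "windows" (some asset)
  else if PySem.Str.isIn "linux" name || PySem.Str.endswith name ".appimage" ||
      PySem.Str.endswith name ".deb" || PySem.Str.endswith name ".rpm" then
    st.insert "linux" (some asset)
  else if PySem.Str.isIn "android" name || PySem.Str.endswith name ".apk" then
    st.insert "android" (some asset)
  else st

def process_release_assets (release_data : Option (List (String × List (List (String × String))))) : List (String × Option (List (String × String))) :=
  match release_data with
  | none => []
  | some d =>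
    if d = [] || !(PySem.Dict.mk d).contains "assets" then []
    else
      let assets := ((PySem.Dict.mk d).get? "assets").getD []
      (assets.foldl pvStepA
        (PySem.Dict.mk [("windows", none), ("linux", none), ("android", none)])).items

-- ===== PORT B =====
def pvRulesB : List (String × String × List String) :=
  [("windows", "windows", [".exe", ".msi"]),
   ("linux", "linux", [".appimage", ".deb", ".rpm"]),
   ("android", "android", [".apk"])]

def pvClassifyB (name : String) : Option String :=
  (pvRulesB.find? (fun r =>
      PySem.Str.isIn r.2.1 name || r.2.2.any (fun suf => PySem.Str.endswith name suf))).map (·.1)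

-- asset['name'].lower() (KeyError excluded by Pre_)
def pvNameB (asset : List (String × String)) : String :=
  PySem.Str.lower (((PySem.Dict.mk asset).get? "name").getD "")

def process_release_assets_alt (release_data : Option (List (String × List (List (String × String))))) : List (String × Option (List (String × String))) :=
  match release_data with
  | none => []
  | some d =>
    if d = [] || !(PySem.Dict.mk d).contains "assets" then []
    else
      let assets := ((PySem.Dict.mk d).get? "assets").getD []
      pvRulesB.map (fun r =>
        (r.1, assets.reverse.find? (fun a => pvClassifyB (pvNameB a) == some r.1)))

-- ===== PRECONDITION & SPEC =====
-- Pre_ excludes only inputs on which A raises KeyError: an asset dict without a 'name' key.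
def Pre_process_release_assets (release_data : Option (List (String × List (List (String × String))))) : Prop :=
  ∀ a ∈ (((PySem.Dict.mk (release_data.getD [])).get? "assets").getD []),
    (PySem.Dict.mk a).contains "name" = true
instance (release_data : Option (List (String × List (List (String × String))))) : Decidable (Pre_process_release_assets release_data) := by unfold Pre_process_release_assets; infer_instance

def pvWitness_process_release_assets : (Option (List (String × List (List (String × String))))) :=
  some [("assets", [[("name", "App-Windows.exe")], [("name", "tool.deb")], [("name", "app.apk")]])]

def Spec_process_release_assets (release_data : Option (List (String × List (List (String × String))))) (out : List (String × Option (List (String × String)))) : Prop := out = process_release_assets_alt release_data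
instance (release_data : Option (List (String × List (List (String × String))))) (out : List (String × Option (List (String × String)))) : Decidable (Spec_process_release_assets release_data out) := by unfold Spec_process_release_assets; infer_instance

-- ===== CLAIM (what is proved, stated in full; the proofs are below) =====
def Claim_equal_process_release_assets : Prop := ∀ (release_data : Option (List (String × List (List (String × String))))), Dom_process_release_assets release_data → Pre_process_release_assets release_data → Spec_process_release_assets release_data (process_release_assets release_data)

-- ===== LEMMAS AND PROOFS =====

-- last matching asset (scanning from the right), else the current value
def pvLastM (p : String) (assets : List (List (String × String))) (v : Option (List (String × String))) : Option (List (String × String)) :=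
  match assets.reverse.find? (fun a => pvClassifyB (pvNameB a) == some p) with
  | some x => some x
  | none => v

theorem pvClassifyB_eq (nm : String) :
    pvClassifyB nm =
      if PySem.Str.isIn "windows" nm || PySem.Str.endswith nm ".exe" || PySem.Str.endswith nm ".msi" then some "windows"
      else if PySem.Str.isIn "linux" nm || PySem.Str.endswith nm ".appimage" ||
          PySem.Str.endswith nm ".deb" || PySem.Str.endswith nm ".rpm" then some "linux"
      else if PySem.Str.isIn "android" nm || PySem.Str.endswith nm ".apk" then some "android"
      else none := by
  simp only [pvClassifyB, pvRulesB, List.find?, List.any_cons, List.any_nil, Bool.or_false,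
    Bool.or_assoc]
  generalize (PySem.Str.isIn "windows" nm || (PySem.Str.endswith nm ".exe" || PySem.Str.endswith nm ".msi")) = c1
  generalize (PySem.Str.isIn "linux" nm || (PySem.Str.endswith nm ".appimage" || (PySem.Str.endswith nm ".deb" || PySem.Str.endswith nm ".rpm"))) = c2
  generalize (PySem.Str.isIn "android" nm || PySem.Str.endswith nm ".apk") = c3
  cases c1 <;> cases c2 <;> cases c3 <;> rfl

theorem pvStepA_mk (a : List (String × String)) (w l an : Option (List (String × String))) :
    pvStepA (PySem.Dict.mk [("windows", w), ("linux", l), ("android", an)]) a =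
    PySem.Dict.mk [("windows", if pvClassifyB (pvNameB a) == some "windows" then some a else w),
                   ("linux", if pvClassifyB (pvNameB a) == some "linux" then some a else l),
                   ("android", if pvClassifyB (pvNameB a) == some "android" then some a else an)] := by
  simp only [pvStepA]
  rw [show PySem.Str.lower (pvNameA a) = pvNameB a from rfl, pvClassifyB_eq]
  generalize pvNameB a = nm
  simp only [Bool.or_assoc]
  generalize (PySem.Str.isIn "windows" nm || (PySem.Str.endswith nm ".exe" || PySem.Str.endswith nm ".msi")) = c1
  generalize (PySem.Str.isIn "linux" nm || (PySem.Str.endswith nm ".appimage" || (PySem.Str.endswith nm ".deb" || PySem.Str.endswith nm ".rpm"))) = c2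
  generalize (PySem.Str.isIn "android" nm || PySem.Str.endswith nm ".apk") = c3
  cases c1 <;> cases c2 <;> cases c3 <;> rfl

theorem pvLastM_cons (p : String) (a : List (String × String)) (t : List (List (String × String)))
    (v : Option (List (String × String))) :
    pvLastM p (a :: t) v = pvLastM p t (if pvClassifyB (pvNameB a) == some p then some a else v) := by
  unfold pvLastM
  rw [List.reverse_cons, List.find?_append]
  cases hc : (pvClassifyB (pvNameB a) == some p) <;>
  cases h : t.reverse.find? (fun x => pvClassifyB (pvNameB x) == some p) <;>
    simp [List.find?, hc]

theorem pvFold_items (assets : List (List (String × String)))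
    (w l an : Option (List (String × String))) :
    (assets.foldl pvStepA (PySem.Dict.mk [("windows", w), ("linux", l), ("android", an)])).items
      = [("windows", pvLastM "windows" assets w), ("linux", pvLastM "linux" assets l),
         ("android", pvLastM "android" assets an)] := by
  induction assets generalizing w l an with
  | nil => rfl
  | cons a t ih =>
    rw [List.foldl_cons, pvStepA_mk, ih, pvLastM_cons, pvLastM_cons, pvLastM_cons]

theorem process_release_assets_spec : Claim_equal_process_release_assets := by
  intro rd _ _
  unfold Spec_process_release_assets process_release_assets process_release_assets_alt
  cases rd with
  | none => rfl
  | some d =>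
    simp only []
    split
    · rfl
    · rw [pvFold_items]
      simp only [pvRulesB, List.map]
      unfold pvLastM
      cases h1 : (((PySem.Dict.mk d).get? "assets").getD []).reverse.find?
          (fun a => pvClassifyB (pvNameB a) == some "windows") <;>
      cases h2 : (((PySem.Dict.mk d).get? "assets").getD []).reverse.find?
          (fun a => pvClassifyB (pvNameB a) == some "linux") <;>
      cases h3 : (((PySem.Dict.mk d).get? "assets").getD []).reverse.find?
          (fun a => pvClassifyB (pvNameB a) == some "android") <;>
      simp
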